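-- pv_equiv track=rewrite | github.com/guanzhongliu/LeetCode_practice | Leetcode/滑动窗口/567.py | checkInclusion_official
-- ===== SOURCE A (Python) =====
-- def checkInclusion_official(s1: str, s2: str) -> bool:
--     l = len(s1)
--     if l > len(s2):
--         return False
--     cnt = [0] * 26
--     for i in range(l):
--         cnt[ord(s1[i]) - ord('a')] -= 1
--     left = 0
--     for right in range(len(s2)):
--         x = ord(s2[right]) - ord('a')
--         cnt[x] += 1
--         while cnt[x] > 0:
--             cnt[ord(s2[left]) - ord('a')] -= 1
--             left += 1
--         if right - left + 1 == l:
--             return True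
--     return False
-- ===== SOURCE B (Python) =====
-- def checkInclusion_official(s1: str, s2: str) -> bool:
--     l = len(s1)
--     if l > len(s2):
--         return False
--     need = [0] * 26
--     for c in s1:
--         need[ord(c) - ord('a')] += 1
--     window = [0] * 26
--     for right in range(len(s2)):
--         window[ord(s2[right]) - ord('a')] += 1
--         if right >= l:
--             window[ord(s2[right - l]) - ord('a')] -= 1
--         if right >= l - 1 and window == need:
--             return True
--     return False
-- ===== Notes on version B (the rewrite author's own statement) =====
-- stated objective: simpler
-- what changed: A maintains one deficit array with a shrinking left pointer and an inner while loop; B precomputes a fixed count array for s1 and slides a fixed-width rolling window count over s2, comparing the two arrays at each step.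
-- outside the precondition, e.g. on checkInclusion_official('a', 'a{'): A returns True, B returns True
import Mathlib
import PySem

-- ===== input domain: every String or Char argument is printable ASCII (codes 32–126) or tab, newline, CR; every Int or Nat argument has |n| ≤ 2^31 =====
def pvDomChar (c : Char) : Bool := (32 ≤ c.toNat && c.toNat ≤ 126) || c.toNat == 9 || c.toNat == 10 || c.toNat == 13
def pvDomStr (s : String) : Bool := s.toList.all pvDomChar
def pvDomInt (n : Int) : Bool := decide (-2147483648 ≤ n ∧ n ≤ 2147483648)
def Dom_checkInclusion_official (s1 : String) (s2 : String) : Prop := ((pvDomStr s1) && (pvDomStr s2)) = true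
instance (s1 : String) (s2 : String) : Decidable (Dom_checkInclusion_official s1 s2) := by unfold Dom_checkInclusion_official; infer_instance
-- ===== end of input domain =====

-- B replaces A's variable-size shrinking window (deficit array + left pointer + inner while) by a
-- fixed-width rolling window compared against a precomputed count array; objective: simpler, same O(n) cost.

-- ord(c) (shared helper: Python's ord)
def pvOrd (c : Char) : Int := (c.toNat : Int)

-- ===== PORT A =====
-- while cnt[x] > 0: cnt[ord(s2[left]) - ord('a')] -= 1; left += 1
-- (fuel argument only makes the loop total; with fuel = len(s2)+1 it never runs out on admitted inputs)
def pvAWhile (cs2 : List Char) (x : Int) : Nat → List Int → Int → List Int × Int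
  | 0, cnt, left => (cnt, left)
  | fuel + 1, cnt, left =>
    if PySem.List.pyGetD cnt x 0 > 0 then
      let y : Int := pvOrd (PySem.List.pyGetD cs2 left ' ') - 97
      pvAWhile cs2 x fuel (PySem.List.pySetD cnt y (PySem.List.pyGetD cnt y 0 - 1)) (left + 1)
    else (cnt, left)

-- for right in range(len(s2)): … with early return True
def pvALoop (cs2 : List Char) (l : Int) (right : Nat) (cnt : List Int) (left : Int) : Bool :=
  if h : right < cs2.length then
    let x : Int := pvOrd (PySem.List.pyGetD cs2 (right : Int) ' ') - 97
    let cnt1 := PySem.List.pySetD cnt x (PySem.List.pyGetD cnt x 0 + 1)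
    let p := pvAWhile cs2 x (cs2.length + 1) cnt1 left
    if (right : Int) - p.2 + 1 = l then true
    else pvALoop cs2 l (right + 1) p.1 p.2
  else false
termination_by cs2.length - right

def checkInclusion_official (s1 : String) (s2 : String) : Bool :=
  let cs1 := s1.toList
  let cs2 := s2.toList
  let l : Int := (cs1.length : Int)
  if l > (cs2.length : Int) then false
  else
    -- for i in range(l): cnt[ord(s1[i]) - ord('a')] -= 1   (fold over the chars of s1)
    let cnt := cs1.foldl (fun cnt c =>
        PySem.List.pySetD cnt (pvOrd c - 97) (PySem.List.pyGetD cnt (pvOrd c - 97) 0 - 1))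
      (List.replicate 26 (0 : Int))
    pvALoop cs2 l 0 cnt 0

-- ===== PORT B =====
-- for right in range(len(s2)): grow window on the right, drop s2[right-l] once right >= l,
-- compare window to need once right >= l-1; early return True
def pvBLoop (cs2 : List Char) (l : Int) (need : List Int) (right : Nat) (window : List Int) : Bool :=
  if h : right < cs2.length then
    let x : Int := pvOrd (PySem.List.pyGetD cs2 (right : Int) ' ') - 97
    let w1 := PySem.List.pySetD window x (PySem.List.pyGetD window x 0 + 1)
    let w2 := if (right : Int) ≥ l then
        let y : Int := pvOrd (PySem.List.pyGetD cs2 ((right : Int) - l) ' ') - 97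
        PySem.List.pySetD w1 y (PySem.List.pyGetD w1 y 0 - 1)
      else w1
    if (right : Int) ≥ l - 1 ∧ w2 = need then true
    else pvBLoop cs2 l need (right + 1) w2
  else false
termination_by cs2.length - right

def checkInclusion_official_alt (s1 : String) (s2 : String) : Bool :=
  let cs1 := s1.toList
  let cs2 := s2.toList
  let l : Int := (cs1.length : Int)
  if l > (cs2.length : Int) then false
  else
    -- for c in s1: need[ord(c) - ord('a')] += 1
    let need := cs1.foldl (fun need c =>
        PySem.List.pySetD need (pvOrd c - 97) (PySem.List.pyGetD need (pvOrd c - 97) 0 + 1))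
      (List.replicate 26 (0 : Int))
    pvBLoop cs2 l need 0 (List.replicate 26 (0 : Int))

-- ===== PRECONDITION & SPEC =====
-- Pre_ excludes (when len(s1) ≤ len(s2)) inputs containing a character outside 'G'..'z' (codes 71..122):
-- there cnt[ord(c) - ord('a')] indexes outside -26..25, so A raises IndexError at the first such character
-- (B raises there too), except that A still returns True when a match is found before that character —
-- a closed-form Pre_ cannot see where the scan stops, so those few returning inputs are excluded as well.
def Pre_checkInclusion_official (s1 : String) (s2 : String) : Prop :=
  s2.toList.length < s1.toList.length ∨
    ((s1.toList ++ s2.toList).all (fun c => 71 ≤ c.toNat && c.toNat ≤ 122) = true)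
instance (s1 : String) (s2 : String) : Decidable (Pre_checkInclusion_official s1 s2) := by
  unfold Pre_checkInclusion_official; infer_instance

def pvWitness_checkInclusion_official : String × String := ("a", "ab")

def Spec_checkInclusion_official (s1 : String) (s2 : String) (out : Bool) : Prop :=
  out = checkInclusion_official_alt s1 s2
instance (s1 : String) (s2 : String) (out : Bool) : Decidable (Spec_checkInclusion_official s1 s2 out) := by
  unfold Spec_checkInclusion_official; infer_instance

-- ===== CLAIM (what is proved, stated in full; the proofs are below) =====
def Claim_equal_checkInclusion_official : Prop := ∀ (s1 : String) (s2 : String), Dom_checkInclusion_official s1 s2 → Pre_checkInclusion_official s1 s2 → Spec_checkInclusion_official s1 s2 (checkInclusion_official s1 s2)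

-- ===== LEMMAS AND PROOFS =====

def pvCls (c : Char) : Nat := (c.toNat + 26 - 97) % 26

def pvN (ws : List Char) (k : Nat) : Int := (ws.countP (fun c => pvCls c == k) : Int)

def pvTab (f : Nat → Int) : List Int := (List.range 26).map f

def pvWin (cs2 : List Char) (j m : Nat) : List Char := (cs2.take m).drop j

def pvGood (cs1 cs2 : List Char) (r : Nat) : Prop :=
  cs1.length ≤ r + 1 ∧ ∀ k, pvN (pvWin cs2 (r + 1 - cs1.length) (r + 1)) k = pvN cs1 k

def pvInB (c : Char) : Prop := 71 ≤ c.toNat ∧ c.toNat ≤ 122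

lemma pvCls_lt (c : Char) : pvCls c < 26 := Nat.mod_lt _ (by norm_num)

lemma pvN_nil (k : Nat) : pvN [] k = 0 := rfl

lemma pvN_nonneg (ws : List Char) (k : Nat) : 0 ≤ pvN ws k := Int.natCast_nonneg _

lemma pvN_cons (c : Char) (ws : List Char) (k : Nat) :
    pvN (c :: ws) k = (if pvCls c = k then 1 else 0) + pvN ws k := by
  simp only [pvN, List.countP_cons, beq_iff_eq]
  split_ifs <;> push_cast <;> omega

lemma pvN_append (ws ts : List Char) (k : Nat) :
    pvN (ws ++ ts) k = pvN ws k + pvN ts k := by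
  simp [pvN, List.countP_append]

lemma pvN_singleton (c : Char) (k : Nat) :
    pvN [c] k = if pvCls c = k then 1 else 0 := by
  rw [show [c] = c :: [] from rfl, pvN_cons, pvN_nil, add_zero]

lemma pvN_of_ge (ws : List Char) (k : Nat) (h : 26 ≤ k) : pvN ws k = 0 := by
  simp only [pvN, Int.natCast_eq_zero]
  rw [List.countP_eq_zero]
  intro c _
  have := pvCls_lt c
  simp only [beq_iff_eq]
  omega

lemma pvSumN (ws : List Char) : ∑ k ∈ Finset.range 26, pvN ws k = (ws.length : Int) := by
  induction ws with
  | nil => simp [pvN_nil]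
  | cons c ws ih =>
    simp only [pvN_cons, Finset.sum_add_distrib, ih, List.length_cons]
    rw [Finset.sum_ite_eq (Finset.range 26) (pvCls c) (fun _ => (1 : Int))]
    simp [Finset.mem_range.mpr (pvCls_lt c)]
    ring

lemma pvIdx_eq (c : Char) (h : pvInB c) :
    PySem.List.pyIdx? 26 (pvOrd c - 97) = some (pvCls c) := by
  obtain ⟨h1, h2⟩ := h
  simp only [PySem.List.pyIdx?, pvOrd, pvCls]
  split_ifs with ha hb hc <;> first | (simp only [Option.some.injEq]; omega) | (exfalso; omega)

lemma pvTab_length (f : Nat → Int) : (pvTab f).length = 26 := by simp [pvTab]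

lemma pvTab_get (f : Nat → Int) (c : Char) (h : pvInB c) :
    PySem.List.pyGetD (pvTab f) (pvOrd c - 97) 0 = f (pvCls c) := by
  simp only [PySem.List.pyGetD, PySem.List.pyGet?, pvTab_length, pvIdx_eq c h]
  simp [pvTab, List.getElem?_map, List.getElem?_range (pvCls_lt c)]

lemma pvTab_set (f : Nat → Int) (c : Char) (h : pvInB c) (v : Int) :
    PySem.List.pySetD (pvTab f) (pvOrd c - 97) v = pvTab (Function.update f (pvCls c) v) := by
  simp only [PySem.List.pySetD, PySem.List.pySet?, pvTab_length, pvIdx_eq c h, Option.map_some,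
    Option.getD_some]
  apply List.ext_getElem
  · simp [pvTab]
  · intro i hi hi'
    simp only [pvTab, List.length_map, List.length_range] at hi'
    simp only [pvTab, List.getElem_set, List.getElem_map, List.getElem_range, Function.update_apply]
    split_ifs with h1 h2 h2 <;> first | rfl | omega

lemma pvTab_zero : List.replicate 26 (0 : Int) = pvTab (fun _ => 0) := by
  simp [pvTab, List.map_const']

lemma pvTab_congr {f g : Nat → Int} (h : ∀ k, f k = g k) : pvTab f = pvTab g := by
  have : f = g := funext h
  rw [this]

lemma pvTab_eq_iff (f g : Nat → Int) : pvTab f = pvTab g ↔ ∀ k < 26, f k = g k := by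
  simp [pvTab, List.map_inj_left]

lemma pvWin_self (cs2 : List Char) (m : Nat) : pvWin cs2 m m = [] := by
  apply List.drop_eq_nil_of_le
  simp only [List.length_take]
  omega

lemma pvWin_length (cs2 : List Char) (j m : Nat) (hm : m ≤ cs2.length) :
    (pvWin cs2 j m).length = m - j := by
  simp only [pvWin, List.length_drop, List.length_take]
  omega

lemma pvWin_succ_right (cs2 : List Char) (j m : Nat) (hj : j ≤ m) (hm : m < cs2.length) :
    pvWin cs2 j (m + 1) = pvWin cs2 j m ++ [cs2[m]] := by
  simp only [pvWin]
  rw [List.take_add_one, List.getElem?_eq_getElem hm]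
  rw [List.drop_append_of_le_length (by simp; omega)]
  simp

lemma pvWin_cons_left (cs2 : List Char) (j m : Nat) (hj : j < m) (hm : m ≤ cs2.length) :
    pvWin cs2 j m = cs2[j]'(by omega) :: pvWin cs2 (j + 1) m := by
  simp only [pvWin]
  rw [List.drop_eq_getElem_cons (by simp; omega)]
  simp [List.getElem_take]

lemma pvSum_diff (cs1 cs2 : List Char) (L r : Nat) (hL : L ≤ r + 1) (hr : r < cs2.length)
    (f : Nat → Int) (hf : ∀ k, f k = pvN (pvWin cs2 L (r + 1)) k - pvN cs1 k) :
    ∑ k ∈ Finset.range 26, f k = ((r : Int) + 1 - L) - cs1.length := by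
  have h1 : ∑ k ∈ Finset.range 26, f k =
      (∑ k ∈ Finset.range 26, pvN (pvWin cs2 L (r + 1)) k) -
        ∑ k ∈ Finset.range 26, pvN cs1 k := by
    rw [← Finset.sum_sub_distrib]
    exact Finset.sum_congr rfl (fun k _ => hf k)
  rw [h1, pvSumN, pvSumN, pvWin_length cs2 L (r + 1) (by omega)]
  omega

lemma pvCond_iff (cs1 cs2 : List Char) (L r : Nat) (hL : L ≤ r + 1) (hr : r < cs2.length)
    (f : Nat → Int) (hf : ∀ k, f k = pvN (pvWin cs2 L (r + 1)) k - pvN cs1 k)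
    (hle : ∀ k, f k ≤ 0)
    (hmin : ∀ j, j < L → ∃ k, pvN cs1 k < pvN (pvWin cs2 j (r + 1)) k) :
    ((r : Int) - L + 1 = cs1.length) ↔ pvGood cs1 cs2 r := by
  have hsum := pvSum_diff cs1 cs2 L r hL hr f hf
  have hsle : ∑ k ∈ Finset.range 26, f k ≤ 0 :=
    Finset.sum_nonpos (fun k _ => hle k)
  constructor
  · intro hcond
    have hzero : ∀ k ∈ Finset.range 26, f k = 0 := by
      rw [← Finset.sum_eq_zero_iff_of_nonpos (fun k _ => hle k)]
      omega
    have hlen : cs1.length ≤ r + 1 := by omega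
    have hLval : L = r + 1 - cs1.length := by omega
    refine ⟨hlen, fun k => ?_⟩
    by_cases hk : k < 26
    · have := hzero k (Finset.mem_range.mpr hk)
      rw [hf k] at this
      rw [← hLval]
      omega
    · rw [pvN_of_ge _ _ (by omega), pvN_of_ge _ _ (by omega)]
  · rintro ⟨hlen, hgood⟩
    have hj0 : ¬ (r + 1 - cs1.length < L) := by
      intro hlt
      obtain ⟨k, hk⟩ := hmin _ hlt
      have := hgood k
      omega
    omega

lemma pvAWhile_spec (cs1 cs2 : List Char) (hb2 : ∀ c ∈ cs2, pvInB c)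
    (r : Nat) (hr : r < cs2.length) (cx : Char) (hcx : pvInB cx) :
    ∀ (fuel L : Nat) (f : Nat → Int),
      r + 1 ≤ fuel + L → L ≤ r + 1 →
      (∀ k, f k = pvN (pvWin cs2 L (r + 1)) k - pvN cs1 k) →
      (∀ k, f k ≤ if k = pvCls cx then 1 else 0) →
      (∀ j, j < L → ∃ k, pvN cs1 k < pvN (pvWin cs2 j (r + 1)) k) →
      ∃ (L' : Nat) (f' : Nat → Int),
        pvAWhile cs2 (pvOrd cx - 97) fuel (pvTab f) (L : Int) = (pvTab f', (L' : Int)) ∧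
        L ≤ L' ∧ L' ≤ r + 1 ∧
        (∀ k, f' k = pvN (pvWin cs2 L' (r + 1)) k - pvN cs1 k) ∧
        (∀ k, f' k ≤ 0) ∧
        (∀ j, j < L' → ∃ k, pvN cs1 k < pvN (pvWin cs2 j (r + 1)) k) := by
  intro fuel
  induction fuel with
  | zero =>
    intro L f hfuel hL hf hbd hmin
    have hLeq : L = r + 1 := by omega
    refine ⟨L, f, rfl, le_refl L, by omega, hf, fun k => ?_, hmin⟩
    have := hf k
    rw [hLeq, pvWin_self] at this
    have := pvN_nonneg cs1 k
    rw [pvN_nil] at *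
    omega
  | succ fuel ih =>
    intro L f hfuel hL hf hbd hmin
    rw [pvAWhile]
    rw [pvTab_get f cx hcx]
    by_cases hpos : f (pvCls cx) > 0
    · rw [if_pos hpos]
      -- window nonempty
      have hLr : L < r + 1 := by
        rcases Nat.lt_or_ge L (r + 1) with h | h
        · exact h
        · exfalso
          have hLeq : L = r + 1 := by omega
          have := hf (pvCls cx)
          rw [hLeq, pvWin_self, pvN_nil] at this
          have := pvN_nonneg cs1 (pvCls cx)
          omega
      -- the removed char
      have hLlen : L < cs2.length := by omega
      have hyget : PySem.List.pyGetD cs2 (L : Int) ' ' = cs2[L] := by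
        rw [PySem.List.pyGetD_natCast, List.getD_eq_getElem _ _ hLlen]
      have hcy : pvInB cs2[L] := hb2 _ (List.getElem_mem hLlen)
      rw [hyget]
      dsimp only
      rw [pvTab_get f _ hcy, pvTab_set f _ hcy]
      have hwin : pvWin cs2 L (r + 1) = cs2[L] :: pvWin cs2 (L + 1) (r + 1) :=
        pvWin_cons_left cs2 L (r + 1) hLr (by omega)
      set f2 : Nat → Int := Function.update f (pvCls cs2[L]) (f (pvCls cs2[L]) - 1) with hf2
      have hf2k : ∀ k, f2 k = pvN (pvWin cs2 (L + 1) (r + 1)) k - pvN cs1 k := by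
        intro k
        have hfk := hf k
        rw [hwin, pvN_cons] at hfk
        rw [hf2, Function.update_apply]
        split_ifs with hk
        · subst hk
          rw [if_pos rfl] at hfk
          omega
        · rw [if_neg (fun hh => hk hh.symm)] at hfk
          omega
      have hbd2 : ∀ k, f2 k ≤ if k = pvCls cx then 1 else 0 := by
        intro k
        have h1 := hbd k
        have h2 := hbd (pvCls cs2[L])
        have hfy1 : f (pvCls cs2[L]) ≤ 1 := by split_ifs at h2 <;> omega
        rw [hf2, Function.update_apply]
        split_ifs with hk hx
        · omega
        · omega
        · split_ifs at h1
          omega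
        · split_ifs at h1
          omega
      have hmin2 : ∀ j, j < L + 1 → ∃ k, pvN cs1 k < pvN (pvWin cs2 j (r + 1)) k := by
        intro j hj
        rcases Nat.lt_or_ge j L with h | h
        · exact hmin j h
        · have hjL : j = L := by omega
          refine ⟨pvCls cx, ?_⟩
          have := hf (pvCls cx)
          rw [hjL]
          omega
      have hcast : ((L : Int) + 1) = ((L + 1 : Nat) : Int) := by push_cast; ring
      rw [hcast]
      obtain ⟨L', f', ha, hb', hc', hd', he', hmm⟩ :=
        ih (L + 1) f2 (by omega) (by omega) hf2k hbd2 hmin2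
      exact ⟨L', f', ha, by omega, hc', hd', he', hmm⟩
    · rw [if_neg hpos]
      refine ⟨L, f, rfl, le_refl L, hL, hf, fun k => ?_, hmin⟩
      by_cases hk : k = pvCls cx
      · rw [hk]; omega
      · have := hbd k
        simp [hk] at this
        exact this

lemma pvALoop_spec (cs1 cs2 : List Char) (hb2 : ∀ c ∈ cs2, pvInB c) :
    ∀ (d r L : Nat) (f : Nat → Int),
      cs2.length ≤ r + d → L ≤ r →
      (∀ k, f k = pvN (pvWin cs2 L r) k - pvN cs1 k) →
      (∀ k, f k ≤ 0) →
      (∀ j, j < L → ∃ k, pvN cs1 k < pvN (pvWin cs2 j r) k) →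
      (pvALoop cs2 (cs1.length : Int) r (pvTab f) (L : Int) = true ↔
        ∃ r', r ≤ r' ∧ r' < cs2.length ∧ pvGood cs1 cs2 r') := by
  intro d
  induction d with
  | zero =>
    intro r L f hd hL hf hle hmin
    rw [pvALoop, dif_neg (by omega)]
    simp only [Bool.false_eq_true, false_iff, not_exists]
    rintro r' ⟨h1, h2, _⟩
    omega
  | succ d ih =>
    intro r L f hd hL hf hle hmin
    by_cases hrn : r < cs2.length
    · rw [pvALoop, dif_pos hrn]
      dsimp only
      have hxget : PySem.List.pyGetD cs2 (r : Int) ' ' = cs2[r] := by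
        rw [PySem.List.pyGetD_natCast, List.getD_eq_getElem _ _ hrn]
      have hcx : pvInB cs2[r] := hb2 _ (List.getElem_mem hrn)
      rw [hxget, pvTab_get f _ hcx, pvTab_set f _ hcx]
      have hwin : pvWin cs2 L (r + 1) = pvWin cs2 L r ++ [cs2[r]] :=
        pvWin_succ_right cs2 L r hL hrn
      set f1 : Nat → Int := Function.update f (pvCls cs2[r]) (f (pvCls cs2[r]) + 1) with hf1
      have hf1k : ∀ k, f1 k = pvN (pvWin cs2 L (r + 1)) k - pvN cs1 k := by
        intro k
        rw [hwin, pvN_append, pvN_singleton, hf1, Function.update_apply]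
        have hfk := hf k
        split_ifs with h1 h2 h2
        · subst h1; omega
        · subst h1; exact absurd rfl h2
        · subst h2; exact absurd rfl h1
        · omega
      have hbd1 : ∀ k, f1 k ≤ if k = pvCls cs2[r] then 1 else 0 := by
        intro k
        rw [hf1, Function.update_apply]
        have h1 := hle k
        have h2 := hle (pvCls cs2[r])
        split_ifs with hk <;> omega
      have hmin1 : ∀ j, j < L → ∃ k, pvN cs1 k < pvN (pvWin cs2 j (r + 1)) k := by
        intro j hj
        obtain ⟨k, hk⟩ := hmin j hj
        refine ⟨k, ?_⟩
        rw [pvWin_succ_right cs2 j r (by omega) hrn, pvN_append, pvN_singleton]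
        split_ifs <;> omega
      obtain ⟨L', f', heq, hLL', hL'r, hf', hle', hmin'⟩ :=
        pvAWhile_spec cs1 cs2 hb2 r hrn cs2[r] hcx (cs2.length + 1) L f1
          (by omega) (by omega) hf1k hbd1 hmin1
      rw [heq]
      by_cases hcond : ((r : Int) - (L' : Int) + 1 = (cs1.length : Int))
      · rw [if_pos hcond]
        simp only [true_iff]
        exact ⟨r, le_refl r, hrn,
          (pvCond_iff cs1 cs2 L' r hL'r hrn f' hf' hle' hmin').mp hcond⟩
      · rw [if_neg hcond]
        have hnotgood : ¬ pvGood cs1 cs2 r := fun g =>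
          hcond ((pvCond_iff cs1 cs2 L' r hL'r hrn f' hf' hle' hmin').mpr g)
        rw [ih (r + 1) L' f' (by omega) (by omega) hf' hle' hmin']
        constructor
        · rintro ⟨r', h1, h2, h3⟩
          exact ⟨r', by omega, h2, h3⟩
        · rintro ⟨r', h1, h2, h3⟩
          refine ⟨r', ?_, h2, h3⟩
          rcases Nat.eq_or_lt_of_le h1 with h | h
          · exact absurd (h ▸ h3) hnotgood
          · omega
    · rw [pvALoop, dif_neg hrn]
      simp only [Bool.false_eq_true, false_iff, not_exists]
      rintro r' ⟨h1, h2, _⟩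
      omega

lemma pvBLoop_spec (cs1 cs2 : List Char) (hb2 : ∀ c ∈ cs2, pvInB c) :
    ∀ (d r : Nat) (g : Nat → Int),
      cs2.length ≤ r + d →
      (∀ k, g k = pvN (pvWin cs2 (r - cs1.length) r) k) →
      (pvBLoop cs2 (cs1.length : Int) (pvTab (pvN cs1)) r (pvTab g) = true ↔
        ∃ r', r ≤ r' ∧ r' < cs2.length ∧ pvGood cs1 cs2 r') := by
  intro d
  induction d with
  | zero =>
    intro r g hd hg
    rw [pvBLoop, dif_neg (by omega)]
    simp only [Bool.false_eq_true, false_iff, not_exists]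
    rintro r' ⟨h1, h2, _⟩
    omega
  | succ d ih =>
    intro r g hd hg
    by_cases hrn : r < cs2.length
    · rw [pvBLoop, dif_pos hrn]
      dsimp only
      have hxget : PySem.List.pyGetD cs2 (r : Int) ' ' = cs2[r] := by
        rw [PySem.List.pyGetD_natCast, List.getD_eq_getElem _ _ hrn]
      have hcx : pvInB cs2[r] := hb2 _ (List.getElem_mem hrn)
      rw [hxget, pvTab_get g _ hcx, pvTab_set g _ hcx]
      set g1 : Nat → Int := Function.update g (pvCls cs2[r]) (g (pvCls cs2[r]) + 1) with hg1
      have hg1k : ∀ k, g1 k = pvN (pvWin cs2 (r - cs1.length) (r + 1)) k := by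
        intro k
        rw [hg1, Function.update_apply,
          pvWin_succ_right cs2 (r - cs1.length) r (by omega) hrn, pvN_append, pvN_singleton]
        have hgk := hg k
        split_ifs with h1 h2 h2
        · subst h1; omega
        · subst h1; exact absurd rfl h2
        · subst h2; exact absurd rfl h1
        · omega
      -- the removal branch
      have hstep : ∃ g2 : Nat → Int,
          (if (r : Int) ≥ (cs1.length : Int) then
              PySem.List.pySetD (pvTab g1)
                (pvOrd (PySem.List.pyGetD cs2 ((r : Int) - (cs1.length : Int)) ' ') - 97)
                (PySem.List.pyGetD (pvTab g1)
                  (pvOrd (PySem.List.pyGetD cs2 ((r : Int) - (cs1.length : Int)) ' ') - 97) 0 - 1)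
            else pvTab g1) = pvTab g2 ∧
          ∀ k, g2 k = pvN (pvWin cs2 (r + 1 - cs1.length) (r + 1)) k := by
        by_cases hge : (r : Int) ≥ (cs1.length : Int)
        · rw [if_pos hge]
          have hlr : cs1.length ≤ r := by omega
          have hcast : (r : Int) - (cs1.length : Int) = ((r - cs1.length : Nat) : Int) := by omega
          have hjlen : r - cs1.length < cs2.length := by omega
          have hyget : PySem.List.pyGetD cs2 ((r : Int) - (cs1.length : Int)) ' '
              = cs2[r - cs1.length] := by
            rw [hcast, PySem.List.pyGetD_natCast, List.getD_eq_getElem _ _ hjlen]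
          have hcy : pvInB cs2[r - cs1.length] := hb2 _ (List.getElem_mem hjlen)
          rw [hyget, pvTab_get g1 _ hcy, pvTab_set g1 _ hcy]
          refine ⟨_, rfl, ?_⟩
          intro k
          have hwc : pvWin cs2 (r - cs1.length) (r + 1)
              = cs2[r - cs1.length] :: pvWin cs2 (r - cs1.length + 1) (r + 1) :=
            pvWin_cons_left cs2 (r - cs1.length) (r + 1) (by omega) (by omega)
          have hidx : r - cs1.length + 1 = r + 1 - cs1.length := by omega
          rw [hidx] at hwc
          have h1 := hg1k k
          have h2 := hg1k (pvCls cs2[r - cs1.length])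
          rw [hwc, pvN_cons] at h1 h2
          rw [Function.update_apply]
          split_ifs with hk
          · subst hk
            rw [if_pos rfl] at h2
            omega
          · rw [if_neg (fun hh => hk hh.symm)] at h1
            omega
        · rw [if_neg hge]
          refine ⟨g1, rfl, ?_⟩
          have : r + 1 - cs1.length = r - cs1.length := by omega
          rw [this]
          exact hg1k
      obtain ⟨g2, hw2, hg2⟩ := hstep
      rw [hw2]
      by_cases hcond : ((r : Int) ≥ (cs1.length : Int) - 1 ∧ pvTab g2 = pvTab (pvN cs1))
      · rw [if_pos hcond]
        simp only [true_iff]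
        refine ⟨r, le_refl r, hrn, ⟨by omega, fun k => ?_⟩⟩
        obtain ⟨hc1, hc2⟩ := hcond
        rw [← hg2 k]
        by_cases hk : k < 26
        · exact (pvTab_eq_iff g2 (pvN cs1)).mp hc2 k hk
        · rw [hg2 k, pvN_of_ge _ _ (by omega), pvN_of_ge _ _ (by omega)]
      · rw [if_neg hcond]
        have hnotgood : ¬ pvGood cs1 cs2 r := by
          rintro ⟨hgl, hgk⟩
          apply hcond
          refine ⟨by omega, (pvTab_eq_iff g2 (pvN cs1)).mpr fun k _ => ?_⟩
          rw [hg2 k]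
          exact hgk k
        have hnext : ∀ k, g2 k = pvN (pvWin cs2 (r + 1 - cs1.length) (r + 1)) k := hg2
        rw [ih (r + 1) g2 (by omega) hnext]
        constructor
        · rintro ⟨r', h1, h2, h3⟩
          exact ⟨r', by omega, h2, h3⟩
        · rintro ⟨r', h1, h2, h3⟩
          refine ⟨r', ?_, h2, h3⟩
          rcases Nat.eq_or_lt_of_le h1 with h | h
          · exact absurd (h ▸ h3) hnotgood
          · omega
    · rw [pvBLoop, dif_neg hrn]
      simp only [Bool.false_eq_true, false_iff, not_exists]
      rintro r' ⟨h1, h2, _⟩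
      omega

lemma pvFoldA (cs : List Char) (hb : ∀ c ∈ cs, pvInB c) :
    ∀ f : Nat → Int,
      cs.foldl (fun cnt c =>
          PySem.List.pySetD cnt (pvOrd c - 97) (PySem.List.pyGetD cnt (pvOrd c - 97) 0 - 1))
        (pvTab f) = pvTab (fun k => f k - pvN cs k) := by
  induction cs with
  | nil =>
    intro f
    rw [List.foldl_nil]
    exact pvTab_congr (fun k => by rw [pvN_nil]; ring)
  | cons c cs ihc =>
    intro f
    have hc : pvInB c := hb c List.mem_cons_self
    rw [List.foldl_cons, pvTab_get f c hc, pvTab_set f c hc,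
      ihc (fun c' hc' => hb c' (List.mem_cons_of_mem _ hc'))]
    apply pvTab_congr
    intro k
    rw [Function.update_apply, pvN_cons]
    by_cases h1 : k = pvCls c
    · subst h1; rw [if_pos rfl, if_pos rfl]; omega
    · rw [if_neg h1, if_neg (fun hh => h1 hh.symm)]; omega

lemma pvFoldB (cs : List Char) (hb : ∀ c ∈ cs, pvInB c) :
    ∀ f : Nat → Int,
      cs.foldl (fun need c =>
          PySem.List.pySetD need (pvOrd c - 97) (PySem.List.pyGetD need (pvOrd c - 97) 0 + 1))
        (pvTab f) = pvTab (fun k => f k + pvN cs k) := by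
  induction cs with
  | nil =>
    intro f
    rw [List.foldl_nil]
    exact pvTab_congr (fun k => by rw [pvN_nil]; ring)
  | cons c cs ihc =>
    intro f
    have hc : pvInB c := hb c List.mem_cons_self
    rw [List.foldl_cons, pvTab_get f c hc, pvTab_set f c hc,
      ihc (fun c' hc' => hb c' (List.mem_cons_of_mem _ hc'))]
    apply pvTab_congr
    intro k
    rw [Function.update_apply, pvN_cons]
    by_cases h1 : k = pvCls c
    · subst h1; rw [if_pos rfl, if_pos rfl]; omega
    · rw [if_neg h1, if_neg (fun hh => h1 hh.symm)]; omega

-- ===== VERDICT (by name: the statement is the Claim_ definition above) =====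
theorem checkInclusion_official_spec : Claim_equal_checkInclusion_official := by
  intro s1 s2 _ hpre
  show checkInclusion_official s1 s2 = checkInclusion_official_alt s1 s2
  unfold Pre_checkInclusion_official at hpre
  replace hpre : s2.toList.length < s1.toList.length ∨
      ∀ c ∈ s1.toList ++ s2.toList, 71 ≤ c.toNat ∧ c.toNat ≤ 122 := by
    rcases hpre with h | h
    · exact Or.inl h
    · refine Or.inr fun c hc => ?_
      have := List.all_eq_true.mp h c hc
      simp only [Bool.and_eq_true, decide_eq_true_eq] at this
      exact this
  unfold checkInclusion_official checkInclusion_official_alt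
  dsimp only
  by_cases hln : ((s1.toList.length : Int) > (s2.toList.length : Int))
  · rw [if_pos hln, if_pos hln]
  · rw [if_neg hln, if_neg hln]
    have hb : ∀ c ∈ s1.toList ++ s2.toList, pvInB c := by
      rcases hpre with h | h
      · exfalso
        have : (s2.toList.length : Int) < (s1.toList.length : Int) := by exact_mod_cast h
        omega
      · exact h
    have hb1 : ∀ c ∈ s1.toList, pvInB c := fun c hc => hb c (List.mem_append_left _ hc)
    have hb2 : ∀ c ∈ s2.toList, pvInB c := fun c hc => hb c (List.mem_append_right _ hc)
    simp only [pvTab_zero]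
    rw [pvFoldA s1.toList hb1, pvFoldB s1.toList hb1]
    rw [show pvTab (fun k => (0 : Int) + pvN s1.toList k) = pvTab (pvN s1.toList) from
      pvTab_congr (fun k => by ring)]
    have hA := pvALoop_spec s1.toList s2.toList hb2 s2.toList.length 0 0
      (fun k => (0 : Int) - pvN s1.toList k) (by omega) (by omega)
      (fun k => by
        show (0 : Int) - pvN s1.toList k = pvN (pvWin s2.toList 0 0) k - pvN s1.toList k
        rw [pvWin_self, pvN_nil])
      (fun k => by
        show (0 : Int) - pvN s1.toList k ≤ 0
        have := pvN_nonneg s1.toList k; omega)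
      (fun j hj => absurd hj (by omega))
    have hB := pvBLoop_spec s1.toList s2.toList hb2 s2.toList.length 0
      (fun _ => (0 : Int)) (by omega)
      (fun k => by
        show (0 : Int) = pvN (pvWin s2.toList (0 - s1.toList.length) 0) k
        rw [Nat.zero_sub, pvWin_self, pvN_nil])
    simp only [Nat.cast_zero] at hA hB
    have : (pvALoop s2.toList (s1.toList.length : Int) 0
        (pvTab fun k => (0 : Int) - pvN s1.toList k) 0 = true) ↔
        (pvBLoop s2.toList (s1.toList.length : Int) (pvTab (pvN s1.toList)) 0
        (pvTab fun _ => (0 : Int)) = true) := hA.trans hB.symm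
    exact Bool.eq_iff_iff.mpr this
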